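-- pv_equiv track=rewrite | github.com/Tom-1508/TCS-NQT-Coding-Sheet-by-TUF | strings/22_rest_questions.py | word_highest_repeated_letters
-- ===== SOURCE A (Python) =====
-- def word_highest_repeated_letters(s):
--     words = s.split()
--     best_word = ""
--     best_repeat = -1
--
--     for w in words:
--         freq = {}
--         for ch in w:
--             freq[ch] = freq.get(ch, 0) + 1
--
--         max_in_word = max(freq.values())  # highest repetition in this word
--
--         if max_in_word > best_repeat:
--             best_repeat = max_in_word
--             best_word = w
--
--     return best_word
-- ===== SOURCE B (Python) =====
-- def _max_run(chars):
--     # chars is sorted, so each letter's occurrences are one contiguous run;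
--     # the longest run is the highest single-letter repetition.
--     max_run = run = 0
--     prev = None
--     for c in chars:
--         run = run + 1 if c == prev else 1
--         if run > max_run:
--             max_run = run
--         prev = c
--     return max_run
--
-- def word_highest_repeated_letters(s):
--     best_word = ""
--     best_repeat = -1
--     for w in s.split():
--         r = _max_run(sorted(w))
--         if r > best_repeat:
--             best_repeat = r
--             best_word = w
--     return best_word
-- ===== Notes on version B (the rewrite author's own statement) =====
-- stated objective: alternative
-- what changed: Replaces A's per-word hash-map frequency counting (dict + max over values) by sorting each word's characters and scanning the sorted sequence for the longest run of equal consecutive characters, which equals the maximum letter multiplicity.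
import Mathlib
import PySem

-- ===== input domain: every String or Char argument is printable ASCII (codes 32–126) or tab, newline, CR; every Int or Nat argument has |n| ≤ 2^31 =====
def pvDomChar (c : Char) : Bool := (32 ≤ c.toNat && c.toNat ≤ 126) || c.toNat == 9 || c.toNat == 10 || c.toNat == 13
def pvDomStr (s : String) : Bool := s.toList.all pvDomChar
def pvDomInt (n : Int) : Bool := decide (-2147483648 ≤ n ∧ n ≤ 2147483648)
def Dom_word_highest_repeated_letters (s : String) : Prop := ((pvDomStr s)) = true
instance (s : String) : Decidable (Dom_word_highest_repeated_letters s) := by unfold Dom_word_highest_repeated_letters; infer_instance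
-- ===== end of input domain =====

-- B sorts each word's characters and takes the longest run of equal consecutive characters
-- instead of A's hash-map frequency counting (same return value; no speed claim).

-- ===== PORT A =====
-- `max(freq.values())` would raise only on an empty word, which `s.split()` never yields;
-- `.getD 0` totalizes that unreachable case.
def word_highest_repeated_letters (s : String) : String :=
  ((PySem.Str.split₀ s).foldl
    (fun (st : String × Int) w =>
      let freq := w.toList.foldl (fun d ch => d.insert ch (d.getD ch 0 + 1))
        (PySem.Dict.empty : PySem.Dict Char Int)
      let maxInWord := (PySem.List.max? freq.values (fun v => v)).getD 0
      if maxInWord > st.2 then (w, maxInWord) else st)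
    ("", -1)).1

-- ===== PORT B =====
-- _max_run: scan with state (max_run, run, prev); `prev = None` is `none`.
def maxRunSorted (chars : List Char) : Int :=
  (chars.foldl
    (fun (st : Int × Int × Option Char) c =>
      let run := if some c = st.2.2 then st.2.1 + 1 else 1
      let mx := if run > st.1 then run else st.1
      (mx, run, some c))
    (0, 0, none)).1

def word_highest_repeated_letters_alt (s : String) : String :=
  ((PySem.Str.split₀ s).foldl
    (fun (st : String × Int) w =>
      let r := maxRunSorted (PySem.List.sorted w.toList (fun c => c) false)
      if r > st.2 then (w, r) else st)
    ("", -1)).1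

-- ===== PRECONDITION & SPEC =====
def Spec_word_highest_repeated_letters (s : String) (out : String) : Prop := out = word_highest_repeated_letters_alt s
instance (s : String) (out : String) : Decidable (Spec_word_highest_repeated_letters s out) := by unfold Spec_word_highest_repeated_letters; infer_instance

-- ===== CLAIM (what is proved, stated in full; the proofs are below) =====
def Claim_equal_word_highest_repeated_letters : Prop := ∀ (s : String), Dom_word_highest_repeated_letters s → Spec_word_highest_repeated_letters s (word_highest_repeated_letters s)

-- ===== LEMMAS AND PROOFS =====

-- The scan step of maxRunSorted, written without `let` (definitionally equal to the port's lambda).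
def pvStep (st : Int × Int × Option Char) (c : Char) : Int × Int × Option Char :=
  ((if (if some c = st.2.2 then st.2.1 + 1 else 1) > st.1 then (if some c = st.2.2 then st.2.1 + 1 else 1) else st.1),
   (if some c = st.2.2 then st.2.1 + 1 else 1), some c)

theorem pvStep_eq :
    (fun (st : Int × Int × Option Char) c =>
      let run := if some c = st.2.2 then st.2.1 + 1 else 1
      let mx := if run > st.1 then run else st.1
      (mx, run, some c)) = pvStep := rfl

-- Proof-side abbreviation: the maximum letter multiplicity of l, as A computes it
-- (max over the distinct characters of their counts, 0 for the empty list).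
def pvM (l : List Char) : Int :=
  (PySem.List.max? ((PySem.Set.ofList l).map (fun c => (l.count c : Int))) (fun v => v)).getD 0

-- A's per-word score (max of the counter dict's values) equals pvM.
theorem pv_key_A (w : String) :
    (PySem.List.max? ((w.toList.foldl (fun d ch => d.insert ch (d.getD ch 0 + 1))
        (PySem.Dict.empty : PySem.Dict Char Int)).values) (fun v => v)).getD 0 = pvM w.toList := by
  rw [PySem.Dict.foldl_insert_getD_add_one_eq_counter]
  have hv : (PySem.Dict.counter w.toList).values
      = (PySem.Set.ofList w.toList).map (fun k => (w.toList.count k : Int)) := by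
    unfold PySem.Dict.values
    rw [PySem.Dict.items_counter, List.map_map]
    rfl
  rw [hv]; rfl

theorem pvM_le (l : List Char) (c : Char) (hc : c ∈ l) : (l.count c : Int) ≤ pvM l := by
  unfold pvM
  have hmem : (l.count c : Int) ∈ (PySem.Set.ofList l).map (fun c => (l.count c : Int)) :=
    List.mem_map.2 ⟨c, (PySem.Set.mem_ofList l c).2 hc, rfl⟩
  rcases h : PySem.List.max? ((PySem.Set.ofList l).map (fun c => (l.count c : Int))) (fun v => v)
      with _ | m
  · rw [PySem.List.max?_eq_none_iff] at h
    rw [h] at hmem; simp at hmem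
  · simpa using PySem.List.max?_isMax h _ hmem

theorem pvM_attain (l : List Char) (hl : l ≠ []) : ∃ c ∈ l, pvM l = (l.count c : Int) := by
  unfold pvM
  rcases h : PySem.List.max? ((PySem.Set.ofList l).map (fun c => (l.count c : Int))) (fun v => v)
      with _ | m
  · rw [PySem.List.max?_eq_none_iff, List.map_eq_nil_iff] at h
    rcases List.exists_mem_of_ne_nil l hl with ⟨c, hc⟩
    have : c ∈ PySem.Set.ofList l := (PySem.Set.mem_ofList l c).2 hc
    rw [h] at this; simp at this
  · have := PySem.List.max?_mem h
    rcases List.mem_map.1 this with ⟨c, hc, hm⟩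
    exact ⟨c, (PySem.Set.mem_ofList l c).1 hc, by simp [← hm]⟩

theorem pvM_perm (l l' : List Char) (h : l.Perm l') : pvM l = pvM l' := by
  rcases eq_or_ne l [] with rfl | hl
  · rw [h.symm.eq_nil]
  · have hl' : l' ≠ [] := fun he => hl (by rw [he] at h; exact h.eq_nil)
    rcases pvM_attain l hl with ⟨c, hc, hcv⟩
    rcases pvM_attain l' hl' with ⟨d, hd, hdv⟩
    have h1 : pvM l ≤ pvM l' := by
      rw [hcv, h.count_eq c]; exact pvM_le l' c (h.mem_iff.1 hc)
    have h2 : pvM l' ≤ pvM l := by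
      rw [hdv, ← h.count_eq d]; exact pvM_le l d (h.mem_iff.2 hd)
    omega

-- Decomposition of pvM along the head of the list.
theorem pvM_cons (c : Char) (l : List Char) :
    pvM (c :: l) = max (1 + (l.count c : Int)) (pvM (l.filter (· ≠ c))) := by
  set R := max (1 + (l.count c : Int)) (pvM (l.filter (· ≠ c))) with hR
  have hub : ∀ d ∈ c :: l, ((c :: l).count d : Int) ≤ R := by
    intro d hd
    rcases eq_or_ne d c with rfl | hne
    · have hcnt : ((d :: l).count d : Int) = 1 + (l.count d : Int) := by
        simp; omega
      rw [hcnt, hR]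
      exact le_max_left _ _
    · have h1 : ((c :: l).count d : Int) = (l.count d : Int) := by
        simp [Ne.symm hne]
      have h2 : ((l.filter (· ≠ c)).count d : Int) = (l.count d : Int) := by
        simp [List.count_filter, hne]
      have hdl : d ∈ l := by
        rcases List.mem_cons.1 hd with h | h
        · exact absurd h hne
        · assumption
      have hdf : d ∈ l.filter (· ≠ c) := List.mem_filter.2 ⟨hdl, by simpa using hne⟩
      have := pvM_le (l.filter (· ≠ c)) d hdf
      rw [h2] at this
      rw [h1, hR]
      exact le_trans this (le_max_right _ _)
  have hat : ∃ d ∈ c :: l, R = ((c :: l).count d : Int) := by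
    rcases le_total (pvM (l.filter (· ≠ c))) (1 + (l.count c : Int)) with hle | hle
    · refine ⟨c, List.mem_cons_self, ?_⟩
      rw [hR, max_eq_left hle]
      simp; omega
    · have hRv : R = pvM (l.filter (· ≠ c)) := max_eq_right hle
      have hne' : l.filter (· ≠ c) ≠ [] := by
        intro he
        have h0 : pvM (l.filter (· ≠ c)) = 0 := by rw [he]; rfl
        have : (0:Int) ≤ (l.count c : Int) := Int.natCast_nonneg _
        omega
      rcases pvM_attain _ hne' with ⟨d, hd, hdv⟩
      have hdmem := List.mem_filter.1 hd
      have hdc : d ≠ c := by simpa using hdmem.2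
      refine ⟨d, List.mem_cons_of_mem _ hdmem.1, ?_⟩
      rw [hRv, hdv]
      simp [List.count_filter, hdc, Ne.symm hdc]
  rcases pvM_attain (c :: l) (by simp) with ⟨d0, hd0, hd0v⟩
  rcases hat with ⟨d1, hd1, hd1v⟩
  have h1 : pvM (c :: l) ≤ R := by rw [hd0v]; exact hub d0 hd0
  have h2 : R ≤ pvM (c :: l) := by rw [hd1v]; exact pvM_le _ d1 hd1
  omega

-- The run scan over a sorted tail, started after having read `run` copies of `p`
-- with current maximum `mx`, computes the overall maximum multiplicity.
theorem pv_scan_inv (l : List Char) (p : Char) (run mx : Int)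
    (hs : l.Pairwise (· ≤ ·)) (hp : ∀ x ∈ l, p ≤ x) (h1 : 1 ≤ run) (h2 : run ≤ mx) :
    (l.foldl pvStep (mx, run, some p)).1
    = max mx (max (run + (l.count p : Int)) (pvM (l.filter (· ≠ p)))) := by
  induction l generalizing p run mx with
  | nil =>
    simp only [List.foldl_nil, List.count_nil, List.filter_nil]
    have h0 : pvM [] = 0 := rfl
    rw [h0]
    simp only [max_def]
    push_cast
    split_ifs <;> omega
  | cons c l ih =>
    rw [List.foldl_cons]
    have hs' := (List.pairwise_cons.1 hs).2
    have hhead := (List.pairwise_cons.1 hs).1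
    rcases eq_or_ne c p with rfl | hne
    · -- run continues
      have hstep : pvStep (mx, run, some c) c
          = ((if run + 1 > mx then run + 1 else mx), run + 1, some c) := by
        simp [pvStep]
      rw [hstep, ih c (run + 1) _ hs' hhead (by omega) (by split <;> omega)]
      have hcnt : ((c :: l).count c : Int) = (l.count c : Int) + 1 := by
        simp
      have hfil : (c :: l).filter (· ≠ c) = l.filter (· ≠ c) := by
        rw [List.filter_cons, if_neg (by simp)]
      rw [hcnt, hfil]
      have hcn : (0:Int) ≤ (l.count c : Int) := Int.natCast_nonneg _
      simp only [max_def]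
      split_ifs <;> omega
    · -- run resets at c
      have hstep : pvStep (mx, run, some p) c = (mx, 1, some c) := by
        simp only [pvStep, Option.some.injEq, if_neg hne, gt_iff_lt,
          if_neg (by omega : ¬ mx < (1:Int))]
      rw [hstep, ih c 1 mx hs' hhead le_rfl (by omega)]
      have hpc : p < c := lt_of_le_of_ne (hp c List.mem_cons_self) (Ne.symm hne)
      have hpnot : p ∉ c :: l := by
        intro hm
        rcases List.mem_cons.1 hm with h | h
        · exact hne h.symm
        · exact absurd (hhead p h) (not_le.2 hpc)
      have hcnt : ((c :: l).count p : Int) = 0 := by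
        rw [List.count_eq_zero.2 hpnot]; rfl
      have hfil : (c :: l).filter (· ≠ p) = c :: l :=
        List.filter_eq_self.2 (fun x hx => by
          simp only [ne_eq, decide_eq_true_eq]
          intro he; exact hpnot (he ▸ hx))
      rw [hcnt, hfil, pvM_cons]
      simp only [max_def]
      split_ifs <;> omega

-- B's per-word score (longest run in the sorted word) equals pvM.
theorem pv_key_B (w : String) :
    maxRunSorted (PySem.List.sorted w.toList (fun c => c) false) = pvM w.toList := by
  have hperm : (PySem.List.sorted w.toList (fun c => c) false).Perm w.toList :=
    PySem.List.sorted_perm _ _ _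
  rw [← pvM_perm _ _ hperm]
  have hpw : (PySem.List.sorted w.toList (fun c => c) false).Pairwise (· ≤ ·) := by
    have := PySem.List.sorted_pairwise w.toList (fun c => c) (κ := Char)
    simpa using this
  unfold maxRunSorted
  rw [pvStep_eq]
  rcases hm : PySem.List.sorted w.toList (fun c => c) false with _ | ⟨c, t⟩
  · rfl
  · rw [hm] at hpw
    have hs' := (List.pairwise_cons.1 hpw).2
    have hhead := (List.pairwise_cons.1 hpw).1
    rw [List.foldl_cons]
    have hstep : pvStep (0, 0, none) c = (1, 1, some c) := by
      simp [pvStep]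
    rw [hstep, pv_scan_inv t c 1 1 hs' hhead le_rfl le_rfl, pvM_cons]
    have hcn : (0:Int) ≤ (t.count c : Int) := Int.natCast_nonneg _
    simp only [max_def]
    split_ifs <;> omega

-- ===== VERDICT (by name: the statement is the Claim_ definition above) =====
theorem word_highest_repeated_letters_spec : Claim_equal_word_highest_repeated_letters := by
  intro s _
  unfold Spec_word_highest_repeated_letters word_highest_repeated_letters word_highest_repeated_letters_alt
  have hfun : (fun (st : String × Int) w =>
      let freq := w.toList.foldl (fun d ch => d.insert ch (d.getD ch 0 + 1))
        (PySem.Dict.empty : PySem.Dict Char Int)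
      let maxInWord := (PySem.List.max? freq.values (fun v => v)).getD 0
      if maxInWord > st.2 then (w, maxInWord) else st)
      = (fun (st : String × Int) w =>
      let r := maxRunSorted (PySem.List.sorted w.toList (fun c => c) false)
      if r > st.2 then (w, r) else st) := by
    funext st w
    simp only [pv_key_A w, pv_key_B w]
  rw [hfun]
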